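-- pv_equiv track=rewrite | github.com/ReussDr/GoWTrello | gems_common.py | troops_needed_to_mythic
-- ===== SOURCE A (Python) =====
-- TROOPS_REQ_FOR_ASCENSION = [5, 10, 25, 50, 100]
--
-- def troops_needed_to_mythic(base_rarity, current_rarity, current_count):
--     """
--     Calculate troops needed to ascend to mythic
--
--     :param name:           name of the Troop
--     :param base_rarity:    Original Ascension of the Troop
--     :param current_rarity: Current Ascension Level
--     :param current_count:  Current number of that troop we have
--     :return:               Number of Troops needed to Ascend to Mythic
--     """
--     # First, calculate the total number of that troop we would need if we had 0
--     total_needed = 1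
--     next_iter = 0
--     for i in range(base_rarity, 6):
--         total_needed += TROOPS_REQ_FOR_ASCENSION[next_iter]
--         next_iter += 1
--
--     # Next, calculate how many troops we've already spent on ascension
--     next_iter = 0
--     total_have = current_count
--     for i in range(base_rarity, current_rarity):
--         total_have += TROOPS_REQ_FOR_ASCENSION[next_iter]
--         next_iter += 1
--
--     #
--     if total_needed <= total_have:
--         return 0
--     return total_needed - total_have
-- ===== SOURCE B (Python) =====
-- TROOPS_REQ_FOR_ASCENSION = [5, 10, 25, 50, 100]
--
-- # Prefix sums: PREFIX[k] = sum of first k entries of TROOPS_REQ_FOR_ASCENSION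
-- PREFIX = [0, 5, 15, 40, 90, 190]
--
-- def troops_needed_to_mythic(base_rarity, current_rarity, current_count):
--     total_needed = 1 + PREFIX[max(0, 6 - base_rarity)]
--     total_have = current_count + PREFIX[max(0, current_rarity - base_rarity)]
--     return max(0, total_needed - total_have)
-- ===== Notes on version B (the rewrite author's own statement) =====
-- stated objective: idiomatic
-- what changed: Replaces both summation loops with O(1) lookups into a precomputed prefix-sum table and a max(0, ...) instead of the final branch.
import Mathlib
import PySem

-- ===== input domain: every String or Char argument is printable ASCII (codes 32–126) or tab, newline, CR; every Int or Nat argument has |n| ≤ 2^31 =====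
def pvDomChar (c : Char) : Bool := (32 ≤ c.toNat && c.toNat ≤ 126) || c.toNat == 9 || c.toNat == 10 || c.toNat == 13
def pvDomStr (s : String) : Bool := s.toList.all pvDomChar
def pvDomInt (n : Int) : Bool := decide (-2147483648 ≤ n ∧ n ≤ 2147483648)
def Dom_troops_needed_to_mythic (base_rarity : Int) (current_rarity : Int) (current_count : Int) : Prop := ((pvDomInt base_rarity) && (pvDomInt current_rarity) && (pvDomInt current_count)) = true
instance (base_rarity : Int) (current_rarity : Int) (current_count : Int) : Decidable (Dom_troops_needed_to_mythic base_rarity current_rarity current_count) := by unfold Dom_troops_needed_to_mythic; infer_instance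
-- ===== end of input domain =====

-- B replaces A's two summation loops with O(1) lookups in a precomputed prefix-sum table (idiomatic; same cost).

-- ===== PORT A =====
def troopsReqForAscension : List Int := [5, 10, 25, 50, 100]

-- each loop carries the state (accumulator, next_iter); list indexing via pyGet? (none = IndexError, excluded by Pre_)
def troops_needed_to_mythic (base_rarity : Int) (current_rarity : Int) (current_count : Int) : Int :=
  let s1 := (PySem.List.pyRange base_rarity 6 1).foldl
    (fun (st : Int × Int) _ => (st.1 + (PySem.List.pyGet? troopsReqForAscension st.2).getD 0, st.2 + 1)) (1, 0)
  let s2 := (PySem.List.pyRange base_rarity current_rarity 1).foldl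
    (fun (st : Int × Int) _ => (st.1 + (PySem.List.pyGet? troopsReqForAscension st.2).getD 0, st.2 + 1)) (current_count, 0)
  if s1.1 ≤ s2.1 then 0 else s1.1 - s2.1

-- ===== PORT B =====
def prefixTable : List Int := [0, 5, 15, 40, 90, 190]

def troops_needed_to_mythic_alt (base_rarity : Int) (current_rarity : Int) (current_count : Int) : Int :=
  let total_needed := 1 + (PySem.List.pyGet? prefixTable (max 0 (6 - base_rarity))).getD 0
  let total_have := current_count + (PySem.List.pyGet? prefixTable (max 0 (current_rarity - base_rarity))).getD 0
  max 0 (total_needed - total_have)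

-- ===== PRECONDITION & SPEC =====
-- A raises IndexError exactly when base_rarity < 1 (first loop runs past the 5-entry table)
-- or current_rarity - base_rarity > 5 (second loop does); B raises on the same inputs.
def Pre_troops_needed_to_mythic (base_rarity : Int) (current_rarity : Int) (current_count : Int) : Prop :=
  1 ≤ base_rarity ∧ current_rarity - base_rarity ≤ 5
instance (base_rarity : Int) (current_rarity : Int) (current_count : Int) : Decidable (Pre_troops_needed_to_mythic base_rarity current_rarity current_count) := by unfold Pre_troops_needed_to_mythic; infer_instance

def pvWitness_troops_needed_to_mythic : Int × Int × Int := (1, 3, 7)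

def Spec_troops_needed_to_mythic (base_rarity : Int) (current_rarity : Int) (current_count : Int) (out : Int) : Prop := out = troops_needed_to_mythic_alt base_rarity current_rarity current_count
instance (base_rarity : Int) (current_rarity : Int) (current_count : Int) (out : Int) : Decidable (Spec_troops_needed_to_mythic base_rarity current_rarity current_count out) := by unfold Spec_troops_needed_to_mythic; infer_instance

-- ===== CLAIM (what is proved, stated in full; the proofs are below) =====
def Claim_equal_troops_needed_to_mythic : Prop := ∀ (base_rarity : Int) (current_rarity : Int) (current_count : Int), Dom_troops_needed_to_mythic base_rarity current_rarity current_count → Pre_troops_needed_to_mythic base_rarity current_rarity current_count → Spec_troops_needed_to_mythic base_rarity current_rarity current_count (troops_needed_to_mythic base_rarity current_rarity current_count)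

-- ===== LEMMAS AND PROOFS =====

-- A's loop body ignores the range element: the fold result depends only on the list length.
def loopStep (st : Int × Int) : Int × Int :=
  (st.1 + (PySem.List.pyGet? troopsReqForAscension st.2).getD 0, st.2 + 1)

theorem foldl_loopStep (L : List Int) (st : Int × Int) :
    L.foldl (fun s _ => loopStep s) st = loopStep^[L.length] st := by
  induction L generalizing st with
  | nil => rfl
  | cons x xs ih => simp [List.foldl_cons, ih, Function.iterate_succ_apply]

-- Iterating the loop step k times from (init, 0) adds exactly prefixTable[k] for k ≤ 5.
theorem iterate_loopStep (k : Nat) (hk : k ≤ 5) (init : Int) :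
    (loopStep^[k] (init, 0)).1 = init + (PySem.List.pyGet? prefixTable (k : Int)).getD 0 := by
  interval_cases k <;>
    simp [loopStep, troopsReqForAscension, prefixTable, PySem.List.pyGet?, PySem.List.pyIdx?,
      Function.iterate_succ_apply] <;> ring

theorem loop_eval (a b : Int) (init : Int) (hk : b - a ≤ 5) :
    ((PySem.List.pyRange a b 1).foldl
      (fun (st : Int × Int) _ => (st.1 + (PySem.List.pyGet? troopsReqForAscension st.2).getD 0, st.2 + 1)) (init, 0)).1
      = init + (PySem.List.pyGet? prefixTable (max 0 (b - a))).getD 0 := by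
  have h1 : (fun (st : Int × Int) (_ : Int) => (st.1 + (PySem.List.pyGet? troopsReqForAscension st.2).getD 0, st.2 + 1))
      = fun s _ => loopStep s := rfl
  rw [h1, foldl_loopStep, PySem.List.length_pyRange_one]
  have hmax : max 0 (b - a) = ((b - a).toNat : Int) := by omega
  rw [hmax, iterate_loopStep (b - a).toNat (by omega) init]

-- ===== VERDICT (by name: the statement is the Claim_ definition above) =====
theorem troops_needed_to_mythic_spec : Claim_equal_troops_needed_to_mythic := by
  intro b c n _ hpre
  obtain ⟨h1, h2⟩ := hpre
  unfold Spec_troops_needed_to_mythic troops_needed_to_mythic troops_needed_to_mythic_alt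
  dsimp only
  rw [loop_eval b 6 1 (by omega), loop_eval b c n h2]
  omega
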